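-- pv_equiv track=rewrite | github.com/jairsan/Segmentation-Free_Streaming_Machine_Translation | experiments/iwslt22_deen/models/Transformer_BIG_ds/document-mt/archive/convert_doc_format_to_sentences_history_length_limited_segmentation_free.py | filter_length
-- ===== SOURCE A (Python) =====
-- def compute_length_buffer(buf):
--     length=0
--     for s in buf:
--         length+= len(s.split(" "))
--     return length
--
-- def filter_length(s_buf,t_buf, length_limit_src, length_limit_tgt, mode):
--     assert mode in ["whole_sentence", "words"]
--     len_s = compute_length_buffer(s_buf)
--     while len_s > length_limit_src:
--         if len(s_buf) > 1 and len_s - len(s_buf[0].split(" ")) >= length_limit_src: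
--             len_s -= len(s_buf[0].split(" "))
--             s_buf.pop(0)
--         elif len(s_buf) > 1:
--             len_current = len(s_buf[0].split(" "))
--             keep = length_limit_src - (len_s - len_current)
--             list_to_keep = s_buf[0].split(" ")[-keep:]
--             assert len(list_to_keep) + (len_s - len_current) == length_limit_src
--             s_buf[0] = " ".join(list_to_keep)
--             break
--         else:
--             words = s_buf[0].split(" ")
--             list_to_keep = words[-length_limit_src:]
--             s_buf[0] = " ".join(list_to_keep)
--             break
--
--     len_t = compute_length_buffer(t_buf)
--     while len_t > length_limit_tgt:
--         if len(t_buf) > 1 and len_t - len(t_buf[0].split(" ")) >= length_limit_tgt: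
--             len_t -= len(t_buf[0].split(" "))
--             t_buf.pop(0)
--         elif len(t_buf) > 1 and mode == "words":
--             len_current = len(t_buf[0].split(" "))
--             keep = length_limit_tgt - (len_t - len_current)
--             list_to_keep = t_buf[0].split(" ")[-keep:]
--             assert len(list_to_keep) + (len_t - len_current) == length_limit_tgt
--             t_buf[0] = " ".join(list_to_keep)
--             break
--
--         elif len(t_buf) > 1 and mode == "whole_sentence":
--             t_buf.pop(0)
--             break
--         elif mode == "words":
--             words = t_buf[0].split(" ")
--             list_to_keep = words[-length_limit_tgt:]
--             t_buf[0] = " ".join(list_to_keep)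
--             break
--         elif mode == "whole_sentence":
--             break
--         else:
--             raise Exception
--
--     return s_buf, t_buf
-- ===== SOURCE B (Python) =====
-- # B: one shared trimming helper: count total words, scan once for how many whole
-- # leading sentences can be dropped, delete them in one slice, then handle the
-- # boundary sentence in a single final step. Mutates the buffers in place like A.
--
-- def _wc(s):
--     return len(s.split(" "))
--
-- def _finish(buf, total, limit, mode):
--     if total <= limit:
--         return
--     if mode == "whole_sentence":
--         if len(buf) > 1:
--             buf.pop(0)
--         return
--     words = buf[0].split(" ")
--     if len(buf) > 1:
--         keep = limit - (total - len(words))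
--         buf[0] = " ".join(words[-keep:])
--     else:
--         buf[0] = " ".join(words[-limit:])
--
-- def _trim(buf, limit, mode):
--     total = sum(_wc(s) for s in buf)
--     n = 0
--     while n < len(buf) - 1 and total - _wc(buf[n]) >= limit:
--         total -= _wc(buf[n])
--         n += 1
--     del buf[:n]
--     _finish(buf, total, limit, mode)
--
-- def filter_length(s_buf, t_buf, length_limit_src, length_limit_tgt, mode):
--     assert mode in ["whole_sentence", "words"]
--     _trim(s_buf, length_limit_src, "words")
--     _trim(t_buf, length_limit_tgt, mode)
--     return s_buf, t_buf
-- ===== Notes on version B (the rewrite author's own statement) =====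
-- stated objective: alternative
-- what changed: A's two duplicated destructive while-loops (pop-one-sentence-per-iteration with break-laden boundary branches) are replaced by one shared helper that sums the word count once, scans once for how many leading sentences to drop, deletes them with a single slice, and applies the boundary handling in one final step parameterised by mode.
import Mathlib
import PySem

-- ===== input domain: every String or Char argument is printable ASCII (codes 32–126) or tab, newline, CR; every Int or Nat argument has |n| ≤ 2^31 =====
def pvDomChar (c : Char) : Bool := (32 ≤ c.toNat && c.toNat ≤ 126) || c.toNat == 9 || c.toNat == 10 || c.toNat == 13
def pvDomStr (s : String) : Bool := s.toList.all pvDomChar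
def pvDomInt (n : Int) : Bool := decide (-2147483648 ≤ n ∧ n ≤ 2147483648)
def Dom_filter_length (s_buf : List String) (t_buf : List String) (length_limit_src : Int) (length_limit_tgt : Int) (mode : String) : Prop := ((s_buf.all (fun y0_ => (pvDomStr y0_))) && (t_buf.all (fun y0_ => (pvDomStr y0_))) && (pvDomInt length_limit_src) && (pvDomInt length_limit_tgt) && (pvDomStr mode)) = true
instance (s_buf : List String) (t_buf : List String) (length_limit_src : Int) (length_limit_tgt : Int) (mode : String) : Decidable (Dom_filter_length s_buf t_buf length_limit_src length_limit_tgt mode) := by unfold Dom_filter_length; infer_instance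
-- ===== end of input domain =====

-- B replaces A's two duplicated destructive while-loops by one shared helper (word count, one drop scan, one
-- boundary step); equivalence is about the RETURN value only (both Pythons also mutate the buffers in place alike).

-- ===== PORT A =====
-- s.split(" ")  (Python: sep = " ", never empty result)
def pvSplit (s : String) : List (List Char) := PySem.Chars.splitOn s.toList [' ']
-- " ".join(ws)
def pvJoin (ws : List (List Char)) : String := String.ofList (PySem.Chars.join [' '] ws)

def compute_length_buffer (buf : List String) : Int :=
  buf.foldl (fun length s => length + ((pvSplit s).length : Int)) 0

-- A's first while-loop (source buffer; always the "words" behaviour).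
-- On the inputs where Python raises IndexError (empty buffer entered with len_s > limit) the port returns []; excluded by Pre_.
def pvSrcLoop (s_buf : List String) (len_s : Int) (lim : Int) : List String :=
  if len_s > lim then
    match s_buf with
    | [] => []
    | s0 :: rest =>
      if rest.length > 0 then
        if len_s - ((pvSplit s0).length : Int) ≥ lim then
          pvSrcLoop rest (len_s - ((pvSplit s0).length : Int)) lim
        else
          let keep := lim - (len_s - ((pvSplit s0).length : Int))
          pvJoin (PySem.List.slice (pvSplit s0) (some (-keep)) none) :: rest
      else
        pvJoin (PySem.List.slice (pvSplit s0) (some (-lim)) none) :: rest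
  else s_buf
termination_by s_buf.length
decreasing_by simp

-- A's second while-loop (target buffer; behaviour depends on mode).
-- Where Python raises (IndexError on empty buffer in "words" mode, 'raise Exception' for other modes — both excluded
-- by Pre_) the port returns the buffer / [].
def pvTgtLoop (t_buf : List String) (len_t : Int) (lim : Int) (mode : String) : List String :=
  if len_t > lim then
    match t_buf with
    | [] => []
    | t0 :: rest =>
      if rest.length > 0 then
        if len_t - ((pvSplit t0).length : Int) ≥ lim then
          pvTgtLoop rest (len_t - ((pvSplit t0).length : Int)) lim mode
        else if mode == "words" then
          let keep := lim - (len_t - ((pvSplit t0).length : Int))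
          pvJoin (PySem.List.slice (pvSplit t0) (some (-keep)) none) :: rest
        else if mode == "whole_sentence" then rest
        else t_buf
      else if mode == "words" then
        pvJoin (PySem.List.slice (pvSplit t0) (some (-lim)) none) :: rest
      else t_buf
  else t_buf
termination_by t_buf.length
decreasing_by simp

def filter_length (s_buf : List String) (t_buf : List String) (length_limit_src : Int) (length_limit_tgt : Int) (mode : String) : List String × List String :=
  (pvSrcLoop s_buf (compute_length_buffer s_buf) length_limit_src,
   pvTgtLoop t_buf (compute_length_buffer t_buf) length_limit_tgt mode)

-- ===== PORT B =====
-- _wc(s) = len(s.split(" "))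
def pvWc (s : String) : Int := ((pvSplit s).length : Int)

-- Source B's drop loop (counting n and 'del buf[:n]' become one structural scan returning the suffix and the new total)
def pvDrop (buf : List String) (total : Int) (lim : Int) : List String × Int :=
  match buf with
  | [] => (buf, total)
  | s0 :: rest =>
    if rest.length > 0 ∧ total - pvWc s0 ≥ lim then pvDrop rest (total - pvWc s0) lim
    else (s0 :: rest, total)

-- _finish: the single boundary step.  Where Source B raises (buf[0] on an empty buffer, excluded by Pre_) it returns [].
def pvFinish (buf : List String) (total : Int) (lim : Int) (mode : String) : List String :=
  if total ≤ lim then buf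
  else if mode == "whole_sentence" then
    match buf with
    | b0 :: rest => if rest.length > 0 then rest else b0 :: rest
    | [] => buf
  else
    match buf with
    | [] => []
    | s0 :: rest =>
      if rest.length > 0 then
        let keep := lim - (total - ((pvSplit s0).length : Int))
        pvJoin (PySem.List.slice (pvSplit s0) (some (-keep)) none) :: rest
      else
        pvJoin (PySem.List.slice (pvSplit s0) (some (-lim)) none) :: rest

def pvTrim (buf : List String) (lim : Int) (mode : String) : List String :=
  let total := buf.foldl (fun a s => a + pvWc s) 0
  let p := pvDrop buf total lim
  pvFinish p.1 p.2 lim mode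

def filter_length_alt (s_buf : List String) (t_buf : List String) (length_limit_src : Int) (length_limit_tgt : Int) (mode : String) : List String × List String :=
  (pvTrim s_buf length_limit_src "words", pvTrim t_buf length_limit_tgt mode)

-- ===== PRECONDITION & SPEC =====
-- Pre_ excludes exactly the inputs where Python A raises: a mode outside the asserted two (AssertionError), and an
-- empty buffer whose (non-"whole_sentence") word limit is negative (IndexError on buf[0]).
def Pre_filter_length (s_buf : List String) (t_buf : List String) (length_limit_src : Int) (length_limit_tgt : Int) (mode : String) : Prop :=
  (mode = "whole_sentence" ∨ mode = "words") ∧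
  (s_buf ≠ [] ∨ 0 ≤ length_limit_src) ∧
  (t_buf ≠ [] ∨ 0 ≤ length_limit_tgt ∨ mode = "whole_sentence")
instance (s_buf : List String) (t_buf : List String) (length_limit_src : Int) (length_limit_tgt : Int) (mode : String) : Decidable (Pre_filter_length s_buf t_buf length_limit_src length_limit_tgt mode) := by unfold Pre_filter_length; infer_instance

def pvWitness_filter_length : List String × List String × Int × Int × String :=
  (["a b", "c"], ["x y z"], 2, 1, "words")

def Spec_filter_length (s_buf : List String) (t_buf : List String) (length_limit_src : Int) (length_limit_tgt : Int) (mode : String) (out : List String × List String) : Prop := out = filter_length_alt s_buf t_buf length_limit_src length_limit_tgt mode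
instance (s_buf : List String) (t_buf : List String) (length_limit_src : Int) (length_limit_tgt : Int) (mode : String) (out : List String × List String) : Decidable (Spec_filter_length s_buf t_buf length_limit_src length_limit_tgt mode out) := by unfold Spec_filter_length; infer_instance

-- ===== CLAIM (what is proved, stated in full; the proofs are below) =====
def Claim_equal_filter_length : Prop := ∀ (s_buf : List String) (t_buf : List String) (length_limit_src : Int) (length_limit_tgt : Int) (mode : String), Dom_filter_length s_buf t_buf length_limit_src length_limit_tgt mode → Pre_filter_length s_buf t_buf length_limit_src length_limit_tgt mode → Spec_filter_length s_buf t_buf length_limit_src length_limit_tgt mode (filter_length s_buf t_buf length_limit_src length_limit_tgt mode)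

-- ===== LEMMAS AND PROOFS =====

-- splitOn never returns the empty list (Python s.split(sep) always has at least one piece)
theorem splitOn_go_len (sep : List Char) : ∀ (fuel : Nat) (l cur : List Char) (acc : List (List Char)), acc.length + 1 ≤ (PySem.Chars.splitOn.go sep fuel l cur acc).length := by
  intro fuel
  induction fuel with
  | zero => intro l cur acc; simp [PySem.Chars.splitOn.go]
  | succ n ih =>
    intro l cur acc
    cases l with
    | nil => simp [PySem.Chars.splitOn.go]
    | cons c rest =>
      rw [PySem.Chars.splitOn.go]
      split
      · have := ih (List.drop sep.length (c :: rest)) [] (cur.reverse :: acc)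
        simp at this ⊢; omega
      · exact ih rest (c :: cur) acc

theorem pvWc_pos (s : String) : 1 ≤ pvWc s := by
  have := splitOn_go_len [' '] (s.toList.length + 1) s.toList [] []
  simp [pvWc, pvSplit, PySem.Chars.splitOn] at this ⊢
  omega

theorem src_loop_eq : ∀ (buf : List String) (total lim : Int),
    pvSrcLoop buf total lim = pvFinish (pvDrop buf total lim).1 (pvDrop buf total lim).2 lim "words" := by
  intro buf
  induction buf with
  | nil =>
    intro total lim
    rw [pvSrcLoop.eq_def]
    simp [pvDrop, pvFinish]
  | cons s0 rest ih =>
    intro total lim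
    have hw := pvWc_pos s0
    rw [pvSrcLoop.eq_def, pvDrop]
    by_cases hr : rest.length > 0
    · by_cases hd : total - pvWc s0 ≥ lim
      · have ht : total > lim := by omega
        rw [if_pos (show total > lim from ht)]
        simp only [if_pos hr]
        rw [if_pos (show rest.length > 0 ∧ total - pvWc s0 ≥ lim from ⟨hr, hd⟩)]
        rw [if_pos (show total - ((pvSplit s0).length : Int) ≥ lim from by simpa [pvWc] using hd)]
        exact ih (total - _) lim
      · rw [if_neg (show ¬(rest.length > 0 ∧ total - pvWc s0 ≥ lim) from fun h => hd h.2)]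
        by_cases ht : total > lim
        · rw [if_pos (show total > lim from ht)]
          simp only [if_pos hr]
          rw [if_neg (show ¬(total - ((pvSplit s0).length : Int) ≥ lim) from by simpa [pvWc] using hd)]
          rw [pvFinish, if_neg (show ¬(total ≤ lim) from by omega)]
          simp [hr]
        · rw [if_neg ht, pvFinish, if_pos (show total ≤ lim from by omega)]
    · rw [if_neg (show ¬(rest.length > 0 ∧ total - pvWc s0 ≥ lim) from fun h => hr h.1)]
      by_cases ht : total > lim
      · rw [if_pos (show total > lim from ht)]
        simp only [if_neg hr]
        rw [pvFinish, if_neg (show ¬(total ≤ lim) from by omega)]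
        simp [hr]
      · rw [if_neg ht, pvFinish, if_pos (show total ≤ lim from by omega)]

theorem tgt_loop_eq : ∀ (buf : List String) (total lim : Int) (mode : String),
    (mode = "whole_sentence" ∨ mode = "words") →
    pvTgtLoop buf total lim mode = pvFinish (pvDrop buf total lim).1 (pvDrop buf total lim).2 lim mode := by
  intro buf
  induction buf with
  | nil =>
    intro total lim mode hm
    rw [pvTgtLoop.eq_def]
    rcases hm with hm | hm <;> subst hm <;> simp [pvDrop, pvFinish]
  | cons s0 rest ih =>
    intro total lim mode hm
    have hw := pvWc_pos s0
    rw [pvTgtLoop.eq_def, pvDrop]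
    by_cases hr : rest.length > 0
    · by_cases hd : total - pvWc s0 ≥ lim
      · have ht : total > lim := by omega
        rw [if_pos (show total > lim from ht)]
        simp only [if_pos hr]
        rw [if_pos (show rest.length > 0 ∧ total - pvWc s0 ≥ lim from ⟨hr, hd⟩)]
        rw [if_pos (show total - ((pvSplit s0).length : Int) ≥ lim from by simpa [pvWc] using hd)]
        exact ih (total - _) lim mode hm
      · rw [if_neg (show ¬(rest.length > 0 ∧ total - pvWc s0 ≥ lim) from fun h => hd h.2)]
        by_cases ht : total > lim
        · rw [if_pos (show total > lim from ht)]
          simp only [if_pos hr]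
          rw [if_neg (show ¬(total - ((pvSplit s0).length : Int) ≥ lim) from by simpa [pvWc] using hd)]
          rw [pvFinish, if_neg (show ¬(total ≤ lim) from by omega)]
          rcases hm with hm | hm <;> subst hm <;> simp [hr]
        · rw [if_neg ht, pvFinish, if_pos (show total ≤ lim from by omega)]
    · rw [if_neg (show ¬(rest.length > 0 ∧ total - pvWc s0 ≥ lim) from fun h => hr h.1)]
      by_cases ht : total > lim
      · rw [if_pos (show total > lim from ht)]
        simp only [if_neg hr]
        rw [pvFinish, if_neg (show ¬(total ≤ lim) from by omega)]
        rcases hm with hm | hm <;> subst hm <;> simp [hr]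
      · rw [if_neg ht, pvFinish, if_pos (show total ≤ lim from by omega)]

theorem total_eq (buf : List String) : compute_length_buffer buf = buf.foldl (fun a s => a + pvWc s) 0 := by
  simp [compute_length_buffer, pvWc]

-- ===== VERDICT (by name: the statement is the Claim_ definition above) =====
theorem filter_length_spec : Claim_equal_filter_length := by
  intro s_buf t_buf ls lt mode _ hpre
  unfold Spec_filter_length filter_length filter_length_alt pvTrim
  simp only [← total_eq]
  rw [src_loop_eq, tgt_loop_eq _ _ _ _ hpre.1]
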